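-- pv_equiv track=rewrite | github.com/hanbee1123/algo | DataStructures/Graph/number_of_islands.py | dfs
-- ===== SOURCE A (Python) =====
-- def dfs(grid, row, col, visited):
--     visited.append((row,col))
--
--     directions = [[-1,0],[1,0],[0,-1],[0,1]]
--     for next_row, next_col in directions:
--         new_row = row + next_row
--         new_col = col + next_col
--
--         if 0<=new_row<len(grid) and 0<=new_col<len(grid[0]) and grid[new_row][new_col] == '1' and (new_row,new_col) not in visited:
--             dfs(grid, new_row, new_col, visited)
--
--     return visited
-- ===== SOURCE B (Python) =====
-- def dfs(grid, row, col, visited):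
--     # Iterative DFS with an explicit stack of [row, col, next_direction_index]
--     # frames, simulating A's call stack exactly (same visit order).
--     directions = [[-1, 0], [1, 0], [0, -1], [0, 1]]
--     visited.append((row, col))
--     stack = [[row, col, 0]]
--     while stack:
--         top = stack[-1]
--         r, c, i = top
--         if i == 4:
--             stack.pop()
--             continue
--         top[2] = i + 1
--         nr = r + directions[i][0]
--         nc = c + directions[i][1]
--         if 0 <= nr < len(grid) and 0 <= nc < len(grid[0]) and grid[nr][nc] == '1' and (nr, nc) not in visited:
--             visited.append((nr, nc))
--             stack.append([nr, nc, 0])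
--     return visited
-- ===== Notes on version B (the rewrite author's own statement) =====
-- stated objective: alternative
-- what changed: Replaces A's recursive DFS with an iterative DFS over an explicit stack of (cell, next-direction-index) frames that simulates the call stack, producing the identical pre-order visited list without recursion.
-- outside the precondition, e.g. on dfs([['0', '0'], ['0']], 0, 0, []): A returns [(0, 0)], B returns [(0, 0)]
import Mathlib
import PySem

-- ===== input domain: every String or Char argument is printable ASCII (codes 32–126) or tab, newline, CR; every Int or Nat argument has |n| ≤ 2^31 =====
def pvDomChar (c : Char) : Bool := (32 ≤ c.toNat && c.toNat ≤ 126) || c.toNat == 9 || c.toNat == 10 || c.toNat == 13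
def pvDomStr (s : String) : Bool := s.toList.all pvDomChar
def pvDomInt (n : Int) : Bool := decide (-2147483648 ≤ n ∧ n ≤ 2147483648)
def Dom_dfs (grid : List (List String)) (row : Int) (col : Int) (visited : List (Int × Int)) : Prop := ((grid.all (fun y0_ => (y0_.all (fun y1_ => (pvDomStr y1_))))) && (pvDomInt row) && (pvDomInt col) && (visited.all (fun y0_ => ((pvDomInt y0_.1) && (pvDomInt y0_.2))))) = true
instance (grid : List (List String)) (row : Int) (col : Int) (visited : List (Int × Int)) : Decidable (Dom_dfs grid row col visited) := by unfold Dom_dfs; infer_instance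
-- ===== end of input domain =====

-- B replaces A's recursive DFS by an iterative DFS over an explicit stack of
-- (cell, next-direction-index) frames (same visit order, same returned list);
-- objective: alternative decomposition, not claimed faster.
-- Both A and B mutate `visited` in place in Python (appends only); the theorems
-- below are about the returned list, which is that same list.
-- Both ports carry a fuel argument as a totality guard only (the fuel chosen in
-- dfs/dfs_alt is proved sufficient in the lemmas below); neither port switches
-- algorithm on any condition.

-- direction table [[-1,0],[1,0],[0,-1],[0,1]] indexed by position
def pvDir (i : Nat) : Int × Int :=
  match i with
  | 0 => (-1, 0)
  | 1 => (1, 0)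
  | 2 => (0, -1)
  | _ => (0, 1)

-- the guard '0<=nr<len(grid) and 0<=nc<len(grid[0]) and grid[nr][nc]=="1" and (nr,nc) not in visited'
-- (the two cell lookups are made total via getD; Python can raise IndexError here only
-- on ragged grids whose later rows are shorter than row 0, where both A and B raise at
-- the same lookup, so nothing is claimed about a returned value there)
def pvOk (grid : List (List String)) (nr nc : Int) (v : List (Int × Int)) : Bool :=
  decide (0 ≤ nr) && decide (nr < (grid.length : Int)) &&
  decide (0 ≤ nc) && decide (nc < (((grid.headD []).length : Int))) &&
  ((((PySem.List.pyGet? grid nr).getD []) |> (fun r => PySem.List.pyGet? r nc)).getD "" == "1") &&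
  !(v.contains (nr, nc))

-- fuel bound: in-range cells whose guard still passes for the current visited
def pvCells (grid : List (List String)) : List (Int × Int) :=
  (List.range grid.length).flatMap (fun i =>
    (List.range (grid.headD []).length).map (fun j => ((i : Int), (j : Int))))

def pvMu (grid : List (List String)) (v : List (Int × Int)) : Nat :=
  ((pvCells grid).filter (fun p => pvOk grid p.1 p.2 v)).length

-- ===== PORT A =====
-- A's recursion with the 4-iteration 'for next_row, next_col in directions' loop
-- unrolled over the literal direction table; fuel bounds the recursion depth.
def pvDfsA (grid : List (List String)) : Nat → Int → Int → List (Int × Int) → List (Int × Int)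
  | 0, _, _, v => v
  | fuel + 1, row, col, v =>
    let v0 := v ++ [(row, col)]
    let v1 := if pvOk grid (row + (pvDir 0).1) (col + (pvDir 0).2) v0 = true then
        pvDfsA grid fuel (row + (pvDir 0).1) (col + (pvDir 0).2) v0 else v0
    let v2 := if pvOk grid (row + (pvDir 1).1) (col + (pvDir 1).2) v1 = true then
        pvDfsA grid fuel (row + (pvDir 1).1) (col + (pvDir 1).2) v1 else v1
    let v3 := if pvOk grid (row + (pvDir 2).1) (col + (pvDir 2).2) v2 = true then
        pvDfsA grid fuel (row + (pvDir 2).1) (col + (pvDir 2).2) v2 else v2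
    let v4 := if pvOk grid (row + (pvDir 3).1) (col + (pvDir 3).2) v3 = true then
        pvDfsA grid fuel (row + (pvDir 3).1) (col + (pvDir 3).2) v3 else v3
    v4

def dfs (grid : List (List String)) (row : Int) (col : Int) (visited : List (Int × Int)) : List (Int × Int) :=
  pvDfsA grid (pvMu grid (visited ++ [(row, col)]) + 1) row col visited

-- ===== PORT B =====
-- B's while-loop over the explicit stack of ((row,col), next_direction_index)
-- frames; fuel bounds the number of loop iterations.
def pvLoopF (grid : List (List String)) : Nat → List ((Int × Int) × Nat) → List (Int × Int) → List (Int × Int)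
  | 0, _, v => v
  | _ + 1, [], v => v
  | fuel + 1, ((r, c), i) :: rest, v =>
    if 4 ≤ i then
      -- 'if i == 4: stack.pop(); continue'
      pvLoopF grid fuel rest v
    else
      -- 'top[2] = i + 1' and the guard on direction i
      let nr := r + (pvDir i).1
      let nc := c + (pvDir i).2
      if pvOk grid nr nc v = true then
        pvLoopF grid fuel (((nr, nc), 0) :: ((r, c), i + 1) :: rest) (v ++ [(nr, nc)])
      else
        pvLoopF grid fuel (((r, c), i + 1) :: rest) v

def dfs_alt (grid : List (List String)) (row : Int) (col : Int) (visited : List (Int × Int)) : List (Int × Int) :=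
  pvLoopF grid (5 * pvMu grid (visited ++ [(row, col)]) + 6) [((row, col), 0)]
    (visited ++ [(row, col)])

-- ===== PRECONDITION & SPEC =====
-- Pre_dfs excludes the inputs on which Python A raises IndexError: ragged grids whose
-- later rows are shorter than row 0 — unless the start cell is so far outside the
-- grid's bounding box that no cell is ever indexed.  This is slightly broader than
-- the exact crash set (a crash needs the DFS to actually reach a short row), so it
-- also excludes some inputs on which A returns; see the cites in the claim.
def Pre_dfs (grid : List (List String)) (row : Int) (col : Int) (visited : List (Int × Int)) : Prop :=
  (∀ r ∈ grid, (grid.headD []).length ≤ r.length) ∨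
  row < -1 ∨ (grid.length : Int) < row ∨ col < -1 ∨ (((grid.headD []).length : Int)) < col
instance (grid : List (List String)) (row : Int) (col : Int) (visited : List (Int × Int)) : Decidable (Pre_dfs grid row col visited) := by unfold Pre_dfs; infer_instance

def pvWitness_dfs : List (List String) × Int × Int × (List (Int × Int)) :=
  ([["1", "1"], ["1", "0"]], 0, 0, [])

def Spec_dfs (grid : List (List String)) (row : Int) (col : Int) (visited : List (Int × Int)) (out : List (Int × Int)) : Prop := out = dfs_alt grid row col visited
instance (grid : List (List String)) (row : Int) (col : Int) (visited : List (Int × Int)) (out : List (Int × Int)) : Decidable (Spec_dfs grid row col visited out) := by unfold Spec_dfs; infer_instance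

-- ===== CLAIM (what is proved, stated in full; the proofs are below) =====
def Claim_equal_dfs : Prop := ∀ (grid : List (List String)) (row : Int) (col : Int) (visited : List (Int × Int)), Dom_dfs grid row col visited → Pre_dfs grid row col visited → Spec_dfs grid row col visited (dfs grid row col visited)

-- ===== LEMMAS AND PROOFS =====

lemma pvFilterLenMono {α : Type} (l : List α) (p q : α → Bool)
    (h : ∀ a, q a = true → p a = true) :
    (l.filter q).length ≤ (l.filter p).length := by
  induction l with
  | nil => simp
  | cons x xs ih =>
    by_cases hq : q x = true
    · simp only [List.filter_cons, hq, h x hq, if_true, List.length_cons]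
      omega
    · have hq' : q x = false := by simpa using hq
      simp only [List.filter_cons, hq', if_false, Bool.false_eq_true]
      cases hp : p x <;> simp <;> omega

lemma pvFilterLenLt {α : Type} (l : List α) (p q : α → Bool) (a : α)
    (ha : a ∈ l) (hpa : p a = true) (hqa : q a = false)
    (h : ∀ b, q b = true → p b = true) :
    (l.filter q).length < (l.filter p).length := by
  induction l with
  | nil => cases ha
  | cons x xs ih =>
    rcases List.mem_cons.1 ha with rfl | hmem
    · simp only [List.filter_cons, hpa, hqa, if_true, Bool.false_eq_true, if_false,
        List.length_cons]
      have := pvFilterLenMono xs p q h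
      omega
    · by_cases hq : q x = true
      · simp only [List.filter_cons, hq, h x hq, if_true, List.length_cons]
        have := ih hmem
        omega
      · have hq' : q x = false := by simpa using hq
        simp only [List.filter_cons, hq', if_false, Bool.false_eq_true]
        have := ih hmem
        cases hp : p x <;> simp <;> omega

lemma pvOk_mono (grid : List (List String)) (nr nc : Int) (v w : List (Int × Int))
    (hsub : ∀ x ∈ v, x ∈ w) (h : pvOk grid nr nc w = true) : pvOk grid nr nc v = true := by
  simp only [pvOk, Bool.and_eq_true, Bool.not_eq_true', List.contains_eq_mem,
    decide_eq_false_iff_not] at h ⊢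
  exact ⟨h.1, fun hm => h.2 (hsub _ hm)⟩

lemma pvMu_mono (grid : List (List String)) (v w : List (Int × Int))
    (hsub : ∀ x ∈ v, x ∈ w) : pvMu grid w ≤ pvMu grid v :=
  pvFilterLenMono _ _ _ (fun a => pvOk_mono grid a.1 a.2 v w hsub)

lemma pvOk_mem_cells (grid : List (List String)) (nr nc : Int) (v : List (Int × Int))
    (h : pvOk grid nr nc v = true) : (nr, nc) ∈ pvCells grid := by
  simp only [pvOk, Bool.and_eq_true, decide_eq_true_eq] at h
  obtain ⟨⟨⟨⟨⟨h1, h2⟩, h3⟩, h4⟩, _⟩, _⟩ := h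
  simp only [pvCells, List.mem_flatMap, List.mem_map, List.mem_range, Prod.mk.injEq,
    List.pure_def, List.bind_eq_flatMap, List.mem_singleton]
  exact ⟨nr, ⟨nr.toNat, by omega, by omega⟩, nc, ⟨nc.toNat, by omega, by omega⟩, rfl, rfl⟩

lemma pvMu_append_lt (grid : List (List String)) (nr nc : Int) (v : List (Int × Int))
    (h : pvOk grid nr nc v = true) :
    pvMu grid (v ++ [(nr, nc)]) < pvMu grid v := by
  apply pvFilterLenLt _ _ _ (nr, nc) (pvOk_mem_cells grid nr nc v h) h
  · simp [pvOk]
  · exact fun b hb => pvOk_mono grid b.1 b.2 v _ (fun x hx => List.mem_append_left _ hx) hb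

-- proof-only well-founded reference versions of the two ports
def pvWeight (stack : List ((Int × Int) × Nat)) : Nat :=
  (stack.map (fun f => 5 - min f.2 4)).sum

lemma pvDecPush (grid : List (List String)) (nr nc : Int) (v : List (Int × Int))
    (h : pvOk grid nr nc v = true) (a b : Nat) :
    Prod.Lex (· < ·) (· < ·) (pvMu grid (v ++ [(nr, nc)]), a) (pvMu grid v, b) :=
  Prod.Lex.left _ _ (pvMu_append_lt grid nr nc v h)

lemma pvDecInner (grid : List (List String)) (nr nc : Int) (v w : List (Int × Int))
    (hw : ∀ x ∈ v ++ [(nr, nc)], x ∈ w)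
    (h : pvOk grid nr nc v = true) (a b : Nat) :
    Prod.Lex (· < ·) (· < ·) (pvMu grid w, a) (pvMu grid v, b) :=
  Prod.Lex.left _ _ (lt_of_le_of_lt (pvMu_mono grid _ _ hw) (pvMu_append_lt grid nr nc v h))

lemma pvDecRight (m i : Nat) (h : i < 4) :
    Prod.Lex (· < ·) (· < ·) (m, 4 - (i + 1)) (m, 4 - i) :=
  Prod.Lex.right _ (by omega)

lemma pvDecPop (grid : List (List String)) (r c : Int) (i : Nat)
    (rest : List ((Int × Int) × Nat)) (v : List (Int × Int)) :
    5 * pvMu grid v + pvWeight rest < 5 * pvMu grid v + pvWeight (((r, c), i) :: rest) := by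
  simp only [pvWeight, List.map_cons, List.sum_cons]
  omega

lemma pvDecPushB (grid : List (List String)) (r c : Int) (i : Nat)
    (rest : List ((Int × Int) × Nat)) (v : List (Int × Int)) (hi : i < 4)
    (h : pvOk grid (r + (pvDir i).1) (c + (pvDir i).2) v = true) :
    5 * pvMu grid (v ++ [(r + (pvDir i).1, c + (pvDir i).2)]) +
        pvWeight (((r + (pvDir i).1, c + (pvDir i).2), 0) :: ((r, c), i + 1) :: rest) <
      5 * pvMu grid v + pvWeight (((r, c), i) :: rest) := by
  have := pvMu_append_lt grid (r + (pvDir i).1) (c + (pvDir i).2) v h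
  simp only [pvWeight, List.map_cons, List.sum_cons]
  omega

lemma pvDecNextB (grid : List (List String)) (r c : Int) (i : Nat)
    (rest : List ((Int × Int) × Nat)) (v : List (Int × Int)) (hi : i < 4) :
    5 * pvMu grid v + pvWeight (((r, c), i + 1) :: rest) <
      5 * pvMu grid v + pvWeight (((r, c), i) :: rest) := by
  simp only [pvWeight, List.map_cons, List.sum_cons]
  omega

def pvGoW (grid : List (List String)) (i : Nat) (row col : Int) (v : List (Int × Int)) :
    {w : List (Int × Int) // ∀ x ∈ v, x ∈ w} :=
  if _h : i < 4 then
    let d := pvDir i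
    let nr := row + d.1
    let nc := col + d.2
    if hok : pvOk grid nr nc v = true then
      match pvGoW grid 0 nr nc (v ++ [(nr, nc)]) with
      | ⟨w, hw⟩ =>
        match pvGoW grid (i + 1) row col w with
        | ⟨u, hu⟩ => ⟨u, fun x hx => hu x (hw x (List.mem_append_left _ hx))⟩
    else
      pvGoW grid (i + 1) row col v
  else
    ⟨v, fun _ hx => hx⟩
termination_by (pvMu grid v, 4 - i)
decreasing_by
  · exact pvDecPush grid nr nc v hok _ _
  · exact pvDecInner grid nr nc v w hw hok _ _
  · exact pvDecRight _ i (by omega)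

def pvLoopW (grid : List (List String)) (stack : List ((Int × Int) × Nat)) (v : List (Int × Int)) : List (Int × Int) :=
  match stack with
  | [] => v
  | ((r, c), i) :: rest =>
    if _h4 : 4 ≤ i then
      pvLoopW grid rest v
    else
      let d := pvDir i
      let nr := r + d.1
      let nc := c + d.2
      if hok : pvOk grid nr nc v = true then
        pvLoopW grid (((nr, nc), 0) :: ((r, c), i + 1) :: rest) (v ++ [(nr, nc)])
      else
        pvLoopW grid (((r, c), i + 1) :: rest) v
termination_by 5 * pvMu grid v + pvWeight stack
decreasing_by
  · exact pvDecPop grid r c i rest v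
  · exact pvDecPushB grid r c i rest v (by omega) hok
  · exact pvDecNextB grid r c i rest v (by omega)

-- one-step unfolding lemmas for the reference versions
lemma pvGoW_ge (grid : List (List String)) (i : Nat) (row col : Int) (v : List (Int × Int))
    (h4 : ¬ i < 4) : (pvGoW grid i row col v).val = v := by
  rw [pvGoW]
  simp [h4]

lemma pvGoW_lt_ok (grid : List (List String)) (i : Nat) (row col : Int) (v : List (Int × Int))
    (hi : i < 4) (hok : pvOk grid (row + (pvDir i).1) (col + (pvDir i).2) v = true) :
    (pvGoW grid i row col v).val =
      (pvGoW grid (i + 1) row col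
        (pvGoW grid 0 (row + (pvDir i).1) (col + (pvDir i).2)
          (v ++ [(row + (pvDir i).1, col + (pvDir i).2)])).val).val := by
  conv_lhs => rw [pvGoW]
  rcases hg : pvGoW grid 0 (row + (pvDir i).1) (col + (pvDir i).2)
      (v ++ [(row + (pvDir i).1, col + (pvDir i).2)]) with ⟨w, hw⟩
  simp [hi, hok]
  rw [hg]

lemma pvGoW_lt_notok (grid : List (List String)) (i : Nat) (row col : Int) (v : List (Int × Int))
    (hi : i < 4) (hok : ¬ pvOk grid (row + (pvDir i).1) (col + (pvDir i).2) v = true) :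
    (pvGoW grid i row col v).val = (pvGoW grid (i + 1) row col v).val := by
  conv_lhs => rw [pvGoW]
  simp [hi, hok]

-- merged step form: one unfolding for both guard outcomes
lemma pvGoW_step (grid : List (List String)) (i : Nat) (row col : Int) (v : List (Int × Int))
    (hi : i < 4) :
    (pvGoW grid i row col v).val =
      (pvGoW grid (i + 1) row col
        (if pvOk grid (row + (pvDir i).1) (col + (pvDir i).2) v = true then
          (pvGoW grid 0 (row + (pvDir i).1) (col + (pvDir i).2)
            (v ++ [(row + (pvDir i).1, col + (pvDir i).2)])).val
         else v)).val := by
  by_cases hok : pvOk grid (row + (pvDir i).1) (col + (pvDir i).2) v = true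
  · rw [if_pos hok]
    exact pvGoW_lt_ok grid i row col v hi hok
  · rw [if_neg hok]
    exact pvGoW_lt_notok grid i row col v hi hok

lemma pvLoopW_nil (grid : List (List String)) (v : List (Int × Int)) :
    pvLoopW grid [] v = v := by
  rw [pvLoopW]

lemma pvLoopW_pop (grid : List (List String)) (r c : Int) (i : Nat)
    (rest : List ((Int × Int) × Nat)) (v : List (Int × Int)) (h4 : 4 ≤ i) :
    pvLoopW grid (((r, c), i) :: rest) v = pvLoopW grid rest v := by
  rw [pvLoopW]
  simp [h4]

lemma pvLoopW_push (grid : List (List String)) (r c : Int) (i : Nat)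
    (rest : List ((Int × Int) × Nat)) (v : List (Int × Int)) (hi : i < 4)
    (hok : pvOk grid (r + (pvDir i).1) (c + (pvDir i).2) v = true) :
    pvLoopW grid (((r, c), i) :: rest) v =
      pvLoopW grid (((r + (pvDir i).1, c + (pvDir i).2), 0) :: ((r, c), i + 1) :: rest)
        (v ++ [(r + (pvDir i).1, c + (pvDir i).2)]) := by
  rw [pvLoopW]
  simp [Nat.not_le.2 hi, hok]

lemma pvLoopW_next (grid : List (List String)) (r c : Int) (i : Nat)
    (rest : List ((Int × Int) × Nat)) (v : List (Int × Int)) (hi : i < 4)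
    (hok : ¬ pvOk grid (r + (pvDir i).1) (c + (pvDir i).2) v = true) :
    pvLoopW grid (((r, c), i) :: rest) v = pvLoopW grid (((r, c), i + 1) :: rest) v := by
  rw [pvLoopW]
  simp [Nat.not_le.2 hi, hok]

-- the frame ((r,c),i) on top of B's stack does exactly what A's loop from direction i does
lemma pvBridge (grid : List (List String)) :
    ∀ (n : Nat) (v : List (Int × Int)) (i : Nat) (r c : Int) (rest : List ((Int × Int) × Nat)),
      5 * pvMu grid v + (4 - i) ≤ n →
      pvLoopW grid (((r, c), i) :: rest) v = pvLoopW grid rest (pvGoW grid i r c v).val := by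
  intro n
  induction n with
  | zero =>
    intro v i r c rest hn
    have h4 : 4 ≤ i := by omega
    rw [pvLoopW_pop grid r c i rest v h4, pvGoW_ge grid i r c v (by omega)]
  | succ n ih =>
    intro v i r c rest hn
    by_cases h4 : 4 ≤ i
    · rw [pvLoopW_pop grid r c i rest v h4, pvGoW_ge grid i r c v (by omega)]
    · have hi : i < 4 := by omega
      by_cases hok : pvOk grid (r + (pvDir i).1) (c + (pvDir i).2) v = true
      · have hmu := pvMu_append_lt grid (r + (pvDir i).1) (c + (pvDir i).2) v hok
        have hmu2 : pvMu grid (pvGoW grid 0 (r + (pvDir i).1) (c + (pvDir i).2)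
            (v ++ [(r + (pvDir i).1, c + (pvDir i).2)])).val ≤
            pvMu grid (v ++ [(r + (pvDir i).1, c + (pvDir i).2)]) :=
          pvMu_mono grid _ _ (pvGoW grid 0 _ _ _).property
        rw [pvLoopW_push grid r c i rest v hi hok]
        rw [ih _ 0 (r + (pvDir i).1) (c + (pvDir i).2) (((r, c), i + 1) :: rest) (by omega)]
        rw [ih _ (i + 1) r c rest (by omega)]
        rw [pvGoW_lt_ok grid i r c v hi hok]
      · rw [pvLoopW_next grid r c i rest v hi hok]
        rw [ih v (i + 1) r c rest (by omega)]
        rw [pvGoW_lt_notok grid i r c v hi hok]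

-- A's fuelled port only ever appends to visited
lemma pvDfsA_superset (grid : List (List String)) :
    ∀ (f : Nat) (r c : Int) (v : List (Int × Int)) (x : Int × Int),
      x ∈ v → x ∈ pvDfsA grid f r c v := by
  intro f
  induction f with
  | zero => intro r c v x hx; exact hx
  | succ f ih =>
    intro r c v x hx
    rw [pvDfsA]
    have step : ∀ (a b : Int) (w : List (Int × Int)), x ∈ w →
        x ∈ (if pvOk grid a b w = true then pvDfsA grid f a b w else w) := by
      intro a b w hw
      split
      · exact ih a b w x hw
      · exact hw
    exact step _ _ _ (step _ _ _ (step _ _ _ (step _ _ _ (List.mem_append_left _ hx))))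

-- with sufficient fuel, A's port computes the reference DFS
lemma pvDfsA_eq (grid : List (List String)) :
    ∀ (n : Nat) (f : Nat) (r c : Int) (v : List (Int × Int)),
      pvMu grid (v ++ [(r, c)]) ≤ n → pvMu grid (v ++ [(r, c)]) + 1 ≤ f →
      pvDfsA grid f r c v = (pvGoW grid 0 r c (v ++ [(r, c)])).val := by
  intro n
  induction n using Nat.strong_induction_on with
  | _ n ihn =>
    intro f r c v hn hf
    obtain ⟨f', rfl⟩ : ∃ f', f = f' + 1 := ⟨f - 1, by omega⟩
    rw [pvDfsA]
    -- one stage: A's guarded recursive call equals the reference inner call, and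
    -- preserves the superset invariant over v0 = v ++ [(r,c)]
    have step : ∀ (a b : Int) (w : List (Int × Int)), (∀ x ∈ v ++ [(r, c)], x ∈ w) →
        ((if pvOk grid a b w = true then pvDfsA grid f' a b w else w) =
          (if pvOk grid a b w = true then (pvGoW grid 0 a b (w ++ [(a, b)])).val else w)) ∧
        (∀ x ∈ v ++ [(r, c)],
          x ∈ (if pvOk grid a b w = true then pvDfsA grid f' a b w else w)) := by
      intro a b w hw
      by_cases hok : pvOk grid a b w = true
      · have hwle : pvMu grid w ≤ pvMu grid (v ++ [(r, c)]) := pvMu_mono grid _ _ hw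
        have hlt : pvMu grid (w ++ [(a, b)]) < pvMu grid w := pvMu_append_lt grid a b w hok
        constructor
        · rw [if_pos hok, if_pos hok]
          exact ihn (pvMu grid (w ++ [(a, b)])) (by omega) f' a b w (by omega) (by omega)
        · intro x hx
          rw [if_pos hok]
          exact pvDfsA_superset grid f' a b w x (hw x hx)
      · rw [if_neg hok, if_neg hok]
        exact ⟨rfl, hw⟩
    have h0 : ∀ x ∈ v ++ [(r, c)], x ∈ v ++ [(r, c)] := fun x hx => hx
    have s1 := step (r + (pvDir 0).1) (c + (pvDir 0).2) (v ++ [(r, c)]) h0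
    rw [s1.1]
    have s2 := step (r + (pvDir 1).1) (c + (pvDir 1).2) _ (s1.1 ▸ s1.2)
    rw [s2.1]
    have s3 := step (r + (pvDir 2).1) (c + (pvDir 2).2) _ (s2.1 ▸ s2.2)
    rw [s3.1]
    have s4 := step (r + (pvDir 3).1) (c + (pvDir 3).2) _ (s3.1 ▸ s3.2)
    rw [s4.1]
    -- now fold the reference side back up with the step lemma
    rw [pvGoW_step grid 0 r c (v ++ [(r, c)]) (by omega)]
    rw [pvGoW_step grid 1 r c _ (by omega)]
    rw [pvGoW_step grid 2 r c _ (by omega)]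
    rw [pvGoW_step grid 3 r c _ (by omega)]
    rw [pvGoW_ge grid 4 r c _ (by omega)]

-- with sufficient fuel, B's port computes the reference loop
lemma pvLoopF_eq (grid : List (List String)) :
    ∀ (f : Nat) (stack : List ((Int × Int) × Nat)) (v : List (Int × Int)),
      5 * pvMu grid v + pvWeight stack < f →
      pvLoopF grid f stack v = pvLoopW grid stack v := by
  intro f
  induction f with
  | zero => intro stack v h; omega
  | succ f ih =>
    intro stack v h
    match stack with
    | [] => rw [pvLoopF, pvLoopW_nil]
    | ((r, c), i) :: rest =>
      rw [pvLoopF]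
      by_cases h4 : 4 ≤ i
      · rw [if_pos h4, pvLoopW_pop grid r c i rest v h4]
        exact ih rest v (by have := pvDecPop grid r c i rest v; omega)
      · have hi : i < 4 := by omega
        rw [if_neg h4]
        by_cases hok : pvOk grid (r + (pvDir i).1) (c + (pvDir i).2) v = true
        · rw [if_pos hok, pvLoopW_push grid r c i rest v hi hok]
          exact ih _ _ (by have := pvDecPushB grid r c i rest v hi hok; omega)
        · rw [if_neg hok, pvLoopW_next grid r c i rest v hi hok]
          exact ih _ _ (by have := pvDecNextB grid r c i rest v hi; omega)

theorem pvMain (grid : List (List String)) (row col : Int) (v : List (Int × Int)) :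
    dfs grid row col v = dfs_alt grid row col v := by
  unfold dfs dfs_alt
  rw [pvDfsA_eq grid (pvMu grid (v ++ [(row, col)])) _ row col v (le_refl _) (le_refl _)]
  rw [pvLoopF_eq grid _ _ _ (by
    simp only [pvWeight, List.map_cons, List.sum_cons, List.map_nil, List.sum_nil]
    omega)]
  rw [pvBridge grid (5 * pvMu grid (v ++ [(row, col)]) + 4) (v ++ [(row, col)]) 0 row col []
    (by omega)]
  rw [pvLoopW_nil]

-- ===== VERDICT (by name: the statement is the Claim_ definition above) =====
theorem dfs_spec : Claim_equal_dfs := by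
  intro grid row col visited _hdom hpre
  unfold Spec_dfs
  -- the two (total) ports agree in every case of Pre_dfs; Pre_dfs scopes the claim
  -- to the inputs on which the Python A returns rather than raising
  rcases hpre with _ | _ | _ | _ | _ <;> exact pvMain grid row col visited
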